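-- pv_equiv track=rewrite | github.com/kingo555/Algorithm | 프로그래머스/0/181881. 조건에 맞게 수열 변환하기 2/조건에 맞게 수열 변환하기 2.py | solution
-- ===== SOURCE A (Python) =====
-- def solution(arr):
--     count = 0
--     while True :
--         arr2 = []
--         for i in arr :
--             if i>=50 and i%2==0 :
--                 arr2.append(int(i/2))
--             elif i< 50 and i%2 ==1 :
--                 arr2.append(i*2+1)
--             else :
--                 arr2.append(i)
--         if arr== arr2 :
--             return count
--         else :
--             count +=1
--             arr= arr2
-- ===== SOURCE B (Python) =====
-- def solution(arr):
--     best = 0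
--     for x in arr:
--         s = 0
--         while True:
--             if x >= 50 and x % 2 == 0:
--                 y = x // 2
--             elif x < 50 and x % 2 == 1:
--                 y = x * 2 + 1
--             else:
--                 y = x
--             if y == x:
--                 break
--             x = y
--             s += 1
--         if s > best:
--             best = s
--     return best
-- ===== Notes on version B (the rewrite author's own statement) =====
-- stated objective: alternative
-- what changed: Instead of repeatedly rebuilding and comparing whole arrays until the array stabilizes, B drives each element independently to its own fixed point and returns the maximum per-element step count.
import Mathlib
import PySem

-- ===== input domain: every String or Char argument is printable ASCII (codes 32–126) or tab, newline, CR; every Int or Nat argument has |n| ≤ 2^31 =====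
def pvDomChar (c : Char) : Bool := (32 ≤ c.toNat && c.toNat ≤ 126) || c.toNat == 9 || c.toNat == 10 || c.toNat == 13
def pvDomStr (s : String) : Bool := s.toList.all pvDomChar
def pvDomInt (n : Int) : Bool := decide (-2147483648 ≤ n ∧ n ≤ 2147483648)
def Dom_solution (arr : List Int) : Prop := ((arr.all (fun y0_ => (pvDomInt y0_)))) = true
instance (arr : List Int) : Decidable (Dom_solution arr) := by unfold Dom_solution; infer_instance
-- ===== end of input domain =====

-- B replaces A's whole-array rounds (rebuild + compare the full list each iteration)
-- by driving each element independently to its fixed point and taking the maximum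
-- per-element step count (objective: alternative algorithm, avoiding whole-array rounds).

-- ===== PORT A =====
-- per-element transform of A's loop body: int(i/2) truncates toward zero = Int.tdiv
def solStep (i : Int) : Int :=
  if 50 ≤ i ∧ PySem.Int.mod i 2 = 0 then i.tdiv 2
  else if i < 50 ∧ PySem.Int.mod i 2 = 1 then i * 2 + 1
  else i

-- fuel bound used only to totalize the `while True` loops (they diverge outside Pre_)
def solMeasure (x : Int) : Nat :=
  (if 50 ≤ x ∧ PySem.Int.mod x 2 = 0 then x + 100
   else if 0 ≤ x ∧ x < 50 ∧ PySem.Int.mod x 2 = 1 then 50 - x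
   else 0).toNat

def solSum (arr : List Int) : Nat := arr.foldl (fun s x => s + solMeasure x) 0

def solLoop : Nat → List Int → Int → Int
  | 0, _, count => count
  | fuel+1, arr, count =>
    let arr2 := arr.map solStep
    if arr = arr2 then count else solLoop fuel arr2 (count + 1)

def solution (arr : List Int) : Int := solLoop (solSum arr + 1) arr 0

-- ===== PORT B =====
-- per-element transform as written in Source B ('//' is floor division)
def altStep (x : Int) : Int :=
  if 50 ≤ x ∧ PySem.Int.mod x 2 = 0 then PySem.Int.floordiv x 2
  else if x < 50 ∧ PySem.Int.mod x 2 = 1 then x * 2 + 1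
  else x

-- inner `while True` of Source B, totalized by fuel (sufficient fuel on Pre_ inputs)
def altLoop : Nat → Int → Int → Int
  | 0, _, s => s
  | fuel+1, x, s =>
    let y := altStep x
    if y = x then s else altLoop fuel y (s + 1)

def solution_alt (arr : List Int) : Int :=
  arr.foldl (fun best x =>
    let s := altLoop (solMeasure x + 1) x 0
    if best < s then s else best) 0

-- ===== PRECONDITION & SPEC =====
-- Pre_ excludes arrays containing an odd element below -1: on those A's while-loop
-- (and B's) never terminates, so A returns on exactly the inputs Pre_ admits.
def Pre_solution (arr : List Int) : Prop := ∀ x ∈ arr, 0 ≤ x ∨ PySem.Int.mod x 2 = 0 ∨ x = -1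
instance (arr : List Int) : Decidable (Pre_solution arr) := by unfold Pre_solution; infer_instance
def pvWitness_solution : List Int := [1, 100, 51, -4, -1]

def Spec_solution (arr : List Int) (out : Int) : Prop := out = solution_alt arr
instance (arr : List Int) (out : Int) : Decidable (Spec_solution arr out) := by unfold Spec_solution; infer_instance

-- ===== CLAIM (what is proved, stated in full; the proofs are below) =====
def Claim_equal_solution : Prop := ∀ (arr : List Int), Dom_solution arr → Pre_solution arr → Spec_solution arr (solution arr)

-- ===== LEMMAS AND PROOFS =====

-- an element is "good" when it is not an odd number below -1
def pvGood (x : Int) : Prop := 0 ≤ x ∨ PySem.Int.mod x 2 = 0 ∨ x = -1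

theorem pvMod2 (x : Int) : PySem.Int.mod x 2 = x % 2 :=
  PySem.Int.mod_eq_emod_of_pos (by norm_num)

theorem pvGood_step {x : Int} (h : pvGood x) : pvGood (solStep x) := by
  unfold pvGood solStep at *
  simp only [pvMod2] at *
  split_ifs with h1 h2 <;> [skip; skip; exact h]
  · left; have : 0 ≤ x := by omega
    exact Int.tdiv_nonneg this (by norm_num)
  · omega

theorem pvTdiv_two {x : Int} (hx : 0 ≤ x) : x.tdiv 2 = x / 2 := by
  rw [Int.tdiv_eq_ediv]; simp [hx]

theorem pvMeasure_dec {x : Int} (h : pvGood x) (hne : solStep x ≠ x) :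
    solMeasure (solStep x) < solMeasure x := by
  unfold pvGood at h
  unfold solStep at *
  unfold solMeasure
  simp only [pvMod2] at *
  split_ifs at hne with h1 h2
  · -- x ≥ 50 even, step = x.tdiv 2
    rw [pvTdiv_two (by omega)] at *
    have h2 : x / 2 * 2 = x := by omega
    split_ifs <;> omega
  · -- x < 50 odd, good and 2x+1 ≠ x → 0 ≤ x, step = 2x+1
    have hx : 0 ≤ x := by omega
    split_ifs <;> omega
  · exact absurd rfl hne

-- B's inner loop takes one solStep per iteration (on good inputs)
theorem pvAltStep_eq (x : Int) : altStep x = solStep x := by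
  unfold altStep solStep
  split_ifs with h1 h2
  · rw [PySem.Int.floordiv_eq_ediv_of_pos (by norm_num), pvTdiv_two (by omega)]
  · rfl
  · rfl

theorem pvAltLoop_succ (x : Int) (f : Nat) (s : Int) :
    altLoop (f+1) x s = if solStep x = x then s else altLoop f (solStep x) (s + 1) := by
  have lhs : altLoop (f+1) x s =
      if altStep x = x then s else altLoop f (altStep x) (s + 1) := rfl
  rw [lhs, pvAltStep_eq]

theorem pvAltLoop_shift : ∀ (f : Nat) (x s : Int), altLoop f x s = s + altLoop f x 0 := by
  intro f
  induction f with
  | zero => intro x s; simp [altLoop]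
  | succ g ih =>
    intro x s
    rw [pvAltLoop_succ, pvAltLoop_succ]
    split_ifs with h1
    · simp
    · rw [ih _ (s+1), ih _ (0+1)]; ring

theorem pvAltLoop_fuel : ∀ (f : Nat) (x : Int), pvGood x → solMeasure x < f →
    ∀ (f' : Nat), solMeasure x < f' → altLoop f x 0 = altLoop f' x 0 := by
  intro f
  induction f with
  | zero => intro x _ h; omega
  | succ g ih =>
    intro x hg hf f' hf'
    obtain ⟨g', rfl⟩ : ∃ g', f' = g' + 1 := ⟨f' - 1, by omega⟩
    rw [pvAltLoop_succ, pvAltLoop_succ]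
    by_cases hfix : solStep x = x
    · rw [if_pos hfix, if_pos hfix]
    · rw [if_neg hfix, if_neg hfix]
      have hd := pvMeasure_dec hg hfix
      rw [pvAltLoop_shift g, pvAltLoop_shift g']
      rw [ih _ (pvGood_step hg) (by omega) g' (by omega)]

-- number of steps element x needs, as computed by B's inner loop
def pvCnt (x : Int) : Int := altLoop (solMeasure x + 1) x 0

theorem pvCnt_nonneg_aux : ∀ (f : Nat) (x s : Int), s ≤ altLoop f x s := by
  intro f
  induction f with
  | zero => intro x s; simp [altLoop]
  | succ g ih =>
    intro x s
    rw [pvAltLoop_succ]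
    split_ifs with h1
    · exact le_refl s
    · exact le_trans (by omega) (ih _ (s+1))

theorem pvCnt_nonneg (x : Int) : 0 ≤ pvCnt x := pvCnt_nonneg_aux _ _ _

theorem pvCnt_rec {x : Int} (h : pvGood x) :
    pvCnt x = if solStep x = x then 0 else pvCnt (solStep x) + 1 := by
  unfold pvCnt
  rw [pvAltLoop_succ]
  by_cases hfix : solStep x = x
  · rw [if_pos hfix, if_pos hfix]
  · rw [if_neg hfix, if_neg hfix]
    rw [pvAltLoop_shift]
    have hd := pvMeasure_dec h hfix
    rw [pvAltLoop_fuel _ _ (pvGood_step h) (by omega) (solMeasure (solStep x) + 1) (by omega)]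
    ring

theorem pvCnt_step {x : Int} (h : pvGood x) :
    pvCnt (solStep x) = max (pvCnt x - 1) 0 := by
  rw [pvCnt_rec h]
  by_cases hfix : solStep x = x
  · rw [if_pos hfix, hfix]
    rw [pvCnt_rec h, if_pos hfix]
    simp
  · rw [if_neg hfix]
    have := pvCnt_nonneg (solStep x)
    omega

-- max-fold over pvCnt
def pvM (arr : List Int) (a : Int) : Int := arr.foldl (fun b x => max b (pvCnt x)) a

theorem pvM_acc_le : ∀ (l : List Int) (a : Int), a ≤ pvM l a := by
  intro l
  induction l with
  | nil => intro a; simp [pvM]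
  | cons y t ih =>
    intro a
    unfold pvM at *
    simp only [List.foldl_cons]
    exact le_trans (le_max_left a (pvCnt y)) (ih _)

theorem pvM_mem_le : ∀ (l : List Int) (a x : Int), x ∈ l → pvCnt x ≤ pvM l a := by
  intro l
  induction l with
  | nil => intro a x hx; simp at hx
  | cons y t ih =>
    intro a x hx
    unfold pvM at *
    simp only [List.foldl_cons]
    rcases List.mem_cons.mp hx with rfl | hx
    · exact le_trans (le_max_right a (pvCnt x)) (pvM_acc_le t _)
    · exact ih _ x hx

theorem pvM_zero : ∀ (l : List Int), (∀ x ∈ l, pvCnt x = 0) → pvM l 0 = 0 := by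
  intro l h
  induction l with
  | nil => simp [pvM]
  | cons y t ih =>
    unfold pvM at *
    simp only [List.foldl_cons]
    rw [h y (by simp), max_self]  -- max 0 0
    exact ih (fun x hx => h x (List.mem_cons_of_mem y hx))

theorem pvM_sub : ∀ (l : List Int) (a : Int),
    l.foldl (fun b x => max b (max (pvCnt x - 1) 0)) (max (a - 1) 0)
      = max (pvM l a - 1) 0 := by
  intro l
  induction l with
  | nil => intro a; simp [pvM]
  | cons y t ih =>
    intro a
    unfold pvM at *
    simp only [List.foldl_cons]
    have h : max (max (a-1) 0) (max (pvCnt y - 1) 0) = max (max a (pvCnt y) - 1) 0 := by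
      omega
    rw [h, ih]

theorem pvM_map_step : ∀ (l : List Int), (∀ x ∈ l, pvGood x) →
    pvM (l.map solStep) 0 = max (pvM l 0 - 1) 0 := by
  intro l hg
  unfold pvM
  rw [List.foldl_map]
  have hc : l.foldl (fun b x => max b (pvCnt (solStep x))) 0
      = l.foldl (fun b x => max b (max (pvCnt x - 1) 0)) 0 :=
    PySem.List.foldl_congr_mem _ _ _ _ (fun acc x hx => by rw [pvCnt_step (hg x hx)])
  rw [hc]
  have h2 := pvM_sub l 0
  have h3 : max ((0:Int) - 1) 0 = 0 := by omega
  rw [h3] at h2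
  exact h2

theorem pvSum_shift : ∀ (l : List Int) (a : Nat),
    l.foldl (fun s x => s + solMeasure x) a = a + l.foldl (fun s x => s + solMeasure x) 0 := by
  intro l
  induction l with
  | nil => intro a; simp
  | cons y t ih =>
    intro a
    simp only [List.foldl_cons]
    rw [ih (a + solMeasure y), ih (0 + solMeasure y)]
    omega

theorem pvSum_map_le : ∀ (l : List Int), (∀ x ∈ l, pvGood x) →
    solSum (l.map solStep) ≤ solSum l := by
  intro l
  induction l with
  | nil => intro _; simp [solSum]
  | cons y t ih =>
    intro hg
    unfold solSum at *
    simp only [List.map_cons, List.foldl_cons]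
    rw [pvSum_shift (t.map solStep), pvSum_shift t]
    have h1 : solMeasure (solStep y) ≤ solMeasure y := by
      by_cases hfix : solStep y = y
      · rw [hfix]
      · exact le_of_lt (pvMeasure_dec (hg y (by simp)) hfix)
    have h2 := ih (fun x hx => hg x (List.mem_cons_of_mem y hx))
    omega

theorem pvSum_map_lt : ∀ (l : List Int), (∀ x ∈ l, pvGood x) → (∃ x ∈ l, solStep x ≠ x) →
    solSum (l.map solStep) < solSum l := by
  intro l
  induction l with
  | nil => intro _ h; simp at h
  | cons y t ih =>
    intro hg hw
    unfold solSum at *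
    simp only [List.map_cons, List.foldl_cons]
    rw [pvSum_shift (t.map solStep), pvSum_shift t]
    have hgt : ∀ x ∈ t, pvGood x := fun x hx => hg x (List.mem_cons_of_mem y hx)
    rcases hw with ⟨x, hx, hne⟩
    rcases List.mem_cons.mp hx with rfl | hxt
    · have h1 : solMeasure (solStep x) < solMeasure x := pvMeasure_dec (hg x (by simp)) hne
      have h2 := pvSum_map_le t hgt
      unfold solSum at h2; omega
    · have h1 : solMeasure (solStep y) ≤ solMeasure y := by
        by_cases hfix : solStep y = y
        · rw [hfix]
        · exact le_of_lt (pvMeasure_dec (hg y (by simp)) hfix)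
      have h2 := ih hgt ⟨x, hxt, hne⟩
      omega

theorem pvMap_eq_self : ∀ (l : List Int), l = l.map solStep → ∀ x ∈ l, solStep x = x := by
  intro l
  induction l with
  | nil => intro _ x hx; simp at hx
  | cons y t ih =>
    intro h x hx
    simp only [List.map_cons, List.cons.injEq] at h
    rcases List.mem_cons.mp hx with rfl | hx
    · exact h.1.symm
    · exact ih h.2 x hx

-- main invariant for A's outer loop
theorem pvLoop_main : ∀ (f : Nat) (l : List Int) (c : Int), (∀ x ∈ l, pvGood x) →
    solSum l < f → solLoop f l c = c + pvM l 0 := by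
  intro f
  induction f with
  | zero => intro l c _ h; omega
  | succ g ih =>
    intro l c hg hf
    unfold solLoop
    by_cases heq : l = l.map solStep
    · rw [if_pos heq]
      have hz : pvM l 0 = 0 := pvM_zero l (fun x hx => by
        rw [pvCnt_rec (hg x hx), if_pos (pvMap_eq_self l heq x hx)])
      omega
    · rw [if_neg heq]
      have hw : ∃ x ∈ l, solStep x ≠ x := by
        by_contra hno
        push Not at hno
        have hid : l.map solStep = l :=
          (List.map_congr_left (fun x hx => hno x hx)).trans (List.map_id' l)
        exact heq hid.symm
      have hlt := pvSum_map_lt l hg hw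
      have hgm : ∀ y ∈ l.map solStep, pvGood y := by
        intro y hy
        rcases List.mem_map.mp hy with ⟨x, hx, rfl⟩
        exact pvGood_step (hg x hx)
      rw [ih (l.map solStep) (c+1) hgm (by omega)]
      rw [pvM_map_step l hg]
      have h1 : 1 ≤ pvM l 0 := by
        rcases hw with ⟨x, hx, hne⟩
        have hc : 1 ≤ pvCnt x := by
          rw [pvCnt_rec (hg x hx), if_neg hne]
          have := pvCnt_nonneg (solStep x)
          omega
        exact le_trans hc (pvM_mem_le l 0 x hx)
      omega

theorem pvAlt_eq_M (arr : List Int) : solution_alt arr = pvM arr 0 := by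
  unfold solution_alt pvM
  apply PySem.List.foldl_congr_mem
  intro acc x _
  simp only [pvCnt]
  omega

-- ===== VERDICT (by name: the statement is the Claim_ definition above) =====
theorem solution_spec : Claim_equal_solution := by
  intro arr _ hpre
  unfold Spec_solution solution
  rw [pvLoop_main (solSum arr + 1) arr 0 hpre (by omega), pvAlt_eq_M]
  ring
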